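-- pv_equiv track=rewrite | github.com/kearseya/dysgu-pipelines | RRAssembler/old_plot_sequence.py | get_underline
-- ===== SOURCE A (Python) =====
-- def get_underline(u, sim, contig):
--
--     for s, e in sim:
--         for i in range(s, e):
--             if u[i] == "_":
--                 u[i] = "="  # Double underline
--             elif u[i] == " ":
--                 u[i] = "_"
--             elif u[i] == "=":
--                 u[i] = "B"
--     return u
-- ===== SOURCE B (Python) =====
-- ORDER = [" ", "_", "=", "B"]
--
--
-- def _rank(ch):
--     if ch == " ":
--         return 0
--     if ch == "_":
--         return 1
--     if ch == "=":
--         return 2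
--     if ch == "B":
--         return 3
--     return None
--
--
-- def get_underline(u, sim, contig):
--     # Difference-array coverage count, then one pass mapping each position's
--     # initial char plus its coverage count to the final char of the chain
--     # ' ' -> '_' -> '=' -> 'B'.  Returns a fresh list (A mutates u in place).
--     n = len(u)
--     diff = [0] * (n + 1)
--     for s, e in sim:
--         s2 = max(s, 0)
--         e2 = min(e, n)
--         if s2 < e2:
--             diff[s2] += 1
--             diff[e2] -= 1
--     out = []
--     count = 0
--     for i, ch in enumerate(u):
--         count += diff[i]
--         r = _rank(ch)
--         if r is None:
--             out.append(ch)
--         else: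
--             out.append(ORDER[min(r + count, 3)])
--     return out
-- ===== Notes on version B (the rewrite author's own statement) =====
-- stated objective: alternative
-- what changed: Replaces the per-interval per-position rewrite loop by a difference-array coverage count followed by one pass that maps each position's initial char plus its coverage count to the final char of the chain ' '->'_'->'='->'B'; B returns a fresh list instead of mutating u in place.
-- intended difference: On in-bounds intervals with a negative start, A's u[i] indexing wraps and underlines tail positions of u while B clamps the interval to start at 0; D_ holds exactly when some wrapped-onto tail position holds a not-yet-saturated chain char, where A returns extra underlining at the tail and B leaves it alone, which is intended since a negative start denotes an interval beginning before the array, not its tail. — e.g. on get_underline([" "], [(-1, 0)], 0): A returns ["_"], B returns [" "]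
import Mathlib
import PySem

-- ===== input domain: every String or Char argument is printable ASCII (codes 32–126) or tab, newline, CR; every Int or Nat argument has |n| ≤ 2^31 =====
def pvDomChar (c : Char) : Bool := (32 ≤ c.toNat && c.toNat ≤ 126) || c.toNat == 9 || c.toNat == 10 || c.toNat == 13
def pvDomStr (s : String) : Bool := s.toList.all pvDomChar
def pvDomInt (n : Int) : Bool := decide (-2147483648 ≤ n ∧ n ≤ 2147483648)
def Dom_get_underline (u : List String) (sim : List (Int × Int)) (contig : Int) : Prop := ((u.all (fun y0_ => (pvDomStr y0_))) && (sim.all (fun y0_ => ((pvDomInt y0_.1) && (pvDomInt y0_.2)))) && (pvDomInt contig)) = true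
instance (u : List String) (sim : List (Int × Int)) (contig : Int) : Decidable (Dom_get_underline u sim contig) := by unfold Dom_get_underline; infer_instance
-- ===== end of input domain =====

-- B replaces A's per-interval per-position rewrite by a difference-array coverage
-- count plus one mapping pass (objective: alternative algorithm); the equivalence is
-- about the RETURN value only: A mutates u in place, B builds a fresh list.

-- ===== PORT A =====
-- one execution of A's inner-loop body: u[i] read, then the elif chain, then the write
def pvAStep (u : List String) (i : Int) : List String :=
  match PySem.List.pyGet? u i with
  | none => u   -- IndexError: excluded by Pre_
  | some c =>
    if c = "_" then PySem.List.pySetD u i "="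
    else if c = " " then PySem.List.pySetD u i "_"
    else if c = "=" then PySem.List.pySetD u i "B"
    else u

def get_underline (u : List String) (sim : List (Int × Int)) (contig : Int) : List String :=
  sim.foldl (fun acc se => (PySem.List.pyRange se.1 se.2 1).foldl pvAStep acc) u

-- ===== PORT B =====
def pvOrder : List String := [" ", "_", "=", "B"]

def pvRank (ch : String) : Option Int :=
  if ch = " " then some 0
  else if ch = "_" then some 1
  else if ch = "=" then some 2
  else if ch = "B" then some 3
  else none

-- Source B's first loop body: enter one interval into the difference array
def pvDStep (n : Int) (d : List Int) (se : Int × Int) : List Int :=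
  let s2 := max se.1 0
  let e2 := min se.2 n
  if s2 < e2 then
    let d1 := PySem.List.pySetD d s2 (PySem.List.pyGetD d s2 0 + 1)
    PySem.List.pySetD d1 e2 (PySem.List.pyGetD d1 e2 0 - 1)
  else d

-- the difference array after all intervals are entered
def pvDiffFinal (n : Int) (sim : List (Int × Int)) : List Int :=
  sim.foldl (pvDStep n) (List.replicate (n.toNat + 1) 0)

-- Source B's second loop body: accumulate the count and emit one output char
def pvBStep (diff : List Int) (acc : Int × List String) (p : Int × String) : Int × List String :=
  let count := acc.1 + PySem.List.pyGetD diff p.1 0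
  match pvRank p.2 with
  | none => (count, acc.2 ++ [p.2])
  | some r => (count, acc.2 ++ [PySem.List.pyGetD pvOrder (min (r + count) 3) p.2])

def get_underline_alt (u : List String) (sim : List (Int × Int)) (contig : Int) : List String :=
  let n : Int := u.length
  let diff := pvDiffFinal n sim
  ((PySem.List.enumerate u).foldl (pvBStep diff) (0, [])).2

-- ===== PRECONDITION & SPEC =====
-- Pre_ excludes exactly the inputs where A raises IndexError: an interval with
-- s < e reaching an index outside [-len(u), len(u)).
def Pre_get_underline (u : List String) (sim : List (Int × Int)) (contig : Int) : Prop :=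
  ∀ se ∈ sim, se.1 < se.2 → (-(u.length : Int) ≤ se.1 ∧ se.2 ≤ (u.length : Int))
instance (u : List String) (sim : List (Int × Int)) (contig : Int) : Decidable (Pre_get_underline u sim contig) := by unfold Pre_get_underline; infer_instance

def pvWitness_get_underline : List String × (List (Int × Int)) × Int := ([" ", "x"], [(0, 1)], 0)

-- input-only counting helpers for D_: how many intervals cover position p directly,
-- and how many reach it only through Python's negative-index wraparound
def pvCovers (se : Int × Int) (p : Nat) : Nat :=
  if se.1 ≤ (p : Int) ∧ (p : Int) < se.2 then 1 else 0
def pvWraps (n : Nat) (se : Int × Int) (p : Nat) : Nat :=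
  if se.1 ≤ (p : Int) - n ∧ (p : Int) - n < se.2 then 1 else 0
def pvCntB (sim : List (Int × Int)) (p : Nat) : Nat := (sim.map (fun se => pvCovers se p)).sum
def pvCntW (n : Nat) (sim : List (Int × Int)) (p : Nat) : Nat := (sim.map (fun se => pvWraps n se p)).sum

-- On in-bounds intervals with a negative start, A's u[i] wraps and underlines tail positions
-- of u while B clamps the interval at 0; D_ holds exactly when some wrapped-onto position
-- holds a not-yet-saturated chain char: there A returns extra underlining at the tail, B
-- leaves it alone, and B's clamping is the intended reading of a start before the array.
def D_get_underline (u : List String) (sim : List (Int × Int)) (contig : Int) : Prop :=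
  ∃ p ∈ List.range u.length, 1 ≤ pvCntW u.length sim p ∧
    ((u.getD p "" = " " ∧ pvCntB sim p < 3) ∨
     (u.getD p "" = "_" ∧ pvCntB sim p < 2) ∨
     (u.getD p "" = "=" ∧ pvCntB sim p < 1))
instance (u : List String) (sim : List (Int × Int)) (contig : Int) : Decidable (D_get_underline u sim contig) := by unfold D_get_underline; infer_instance

def Spec_get_underline (u : List String) (sim : List (Int × Int)) (contig : Int) (out : List String) : Prop := ¬ D_get_underline u sim contig → out = get_underline_alt u sim contig
instance (u : List String) (sim : List (Int × Int)) (contig : Int) (out : List String) : Decidable (Spec_get_underline u sim contig out) := by unfold Spec_get_underline; infer_instance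

def pvDiffWitness_get_underline : List String × (List (Int × Int)) × Int := ([" "], [(-1, 0)], 0)
def pvDiffWitnessOut_get_underline : (List String) × (List String) := (["_"], [" "])

-- ===== CLAIM (what is proved, stated in full; the proofs are below) =====
def Claim_unchanged_get_underline : Prop := ∀ (u : List String) (sim : List (Int × Int)) (contig : Int), Dom_get_underline u sim contig → Pre_get_underline u sim contig → Spec_get_underline u sim contig (get_underline u sim contig)
def Claim_changed_get_underline : Prop := Dom_get_underline (pvDiffWitness_get_underline.1) (pvDiffWitness_get_underline.2.1) (pvDiffWitness_get_underline.2.2) ∧ Pre_get_underline (pvDiffWitness_get_underline.1) (pvDiffWitness_get_underline.2.1) (pvDiffWitness_get_underline.2.2) ∧ D_get_underline (pvDiffWitness_get_underline.1) (pvDiffWitness_get_underline.2.1) (pvDiffWitness_get_underline.2.2) ∧ get_underline (pvDiffWitness_get_underline.1) (pvDiffWitness_get_underline.2.1) (pvDiffWitness_get_underline.2.2) = pvDiffWitnessOut_get_underline.1 ∧ get_underline_alt (pvDiffWitness_get_underline.1) (pvDiffWitness_get_underline.2.1) (pvDiffWitness_get_underline.2.2) = pvDiffWitnessOut_get_underline.2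 ∧ pvDiffWitnessOut_get_underline.1 ≠ pvDiffWitnessOut_get_underline.2
def Claim_exact_get_underline : Prop := ∀ (u : List String) (sim : List (Int × Int)) (contig : Int), Dom_get_underline u sim contig → Pre_get_underline u sim contig → D_get_underline u sim contig → get_underline u sim contig ≠ get_underline_alt u sim contig

-- ===== LEMMAS AND PROOFS =====

-- value-level transition of A's elif chain
def pvStep (c : String) : String :=
  if c = "_" then "=" else if c = " " then "_" else if c = "=" then "B" else c

-- how many times A's inner loop over range(a,e) touches position p (directly or wrapped)
def pvTouch (n : Nat) (a e : Int) (p : Nat) : Nat :=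
  (if a ≤ (p : Int) ∧ (p : Int) < e then 1 else 0)
  + (if a ≤ (p : Int) - n ∧ (p : Int) - n < e then 1 else 0)

theorem pvAStep_length (u : List String) (i : Int) : (pvAStep u i).length = u.length := by
  unfold pvAStep
  cases h : PySem.List.pyGet? u i with
  | none => rfl
  | some c =>
    show (if c = "_" then PySem.List.pySetD u i "="
        else if c = " " then PySem.List.pySetD u i "_"
        else if c = "=" then PySem.List.pySetD u i "B" else u).length = u.length
    split_ifs <;> simp [PySem.List.length_pySetD]

theorem pvAStep_getD (u : List String) (i : Int) (p : Nat)
    (h1 : -(u.length : Int) ≤ i) (h2 : i < (u.length : Int)) (hp : p < u.length) :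
    (pvAStep u i).getD p "" =
      if ((p : Int) = i ∨ (p : Int) - u.length = i) then pvStep (u.getD p "") else u.getD p "" := by
  obtain ⟨j, hj, hidx, hiff⟩ : ∃ j : Nat, j < u.length ∧ PySem.List.pyIdx? u.length i = some j ∧
      (((p : Int) = i ∨ (p : Int) - u.length = i) ↔ p = j) := by
    by_cases hi : 0 ≤ i
    · refine ⟨i.toNat, by omega, ?_, by omega⟩
      simp [PySem.List.pyIdx?, hi, h2]
    · refine ⟨u.length - (-i).toNat, by omega, ?_, by omega⟩
      simp [PySem.List.pyIdx?, hi, h1]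
  have hget : PySem.List.pyGet? u i = some (u.getD j "") := by
    simp [PySem.List.pyGet?, hidx, List.getElem?_eq_getElem hj, List.getD_eq_getElem u "" hj]
  have hset : ∀ v : String, (PySem.List.pySetD u i v).getD p "" = if p = j then v else u.getD p "" := by
    intro v
    simp only [PySem.List.pySetD, PySem.List.pySet?, hidx, Option.map_some, Option.getD_some]
    rw [List.getD_eq_getElem?_getD, List.getElem?_set]
    by_cases hpj : p = j
    · simp [hpj, hj]
    · have hpj' : ¬ j = p := fun h => hpj h.symm
      simp [hpj, hpj', List.getD_eq_getElem?_getD]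
  unfold pvAStep
  rw [hget]
  show (if u.getD j "" = "_" then PySem.List.pySetD u i "="
      else if u.getD j "" = " " then PySem.List.pySetD u i "_"
      else if u.getD j "" = "=" then PySem.List.pySetD u i "B" else u).getD p "" = _
  by_cases hhit : ((p : Int) = i ∨ (p : Int) - u.length = i)
  · have hpj : p = j := hiff.mp hhit
    rw [if_pos hhit]
    subst hpj
    split_ifs with hc1 hc2 hc3
    · rw [hset, if_pos rfl]; simp only [pvStep]; rw [hc1]; simp
    · rw [hset, if_pos rfl]; simp only [pvStep]; rw [hc2]; simp
    · rw [hset, if_pos rfl]; simp only [pvStep]; rw [hc3]; simp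
    · simp only [pvStep]; rw [if_neg hc1, if_neg hc2, if_neg hc3]
  · have hpj : p ≠ j := fun h => hhit (hiff.mpr h)
    rw [if_neg hhit]
    split_ifs <;> first | (rw [hset]; simp [hpj]) | rfl

theorem pv_innerA (k : Nat) : ∀ (a e : Int) (u : List String), (e - a).toNat = k →
    (a < e → -(u.length : Int) ≤ a ∧ e ≤ (u.length : Int)) →
    ((PySem.List.pyRange a e 1).foldl pvAStep u).length = u.length ∧
    ∀ p < u.length, ((PySem.List.pyRange a e 1).foldl pvAStep u).getD p "" =
      pvStep^[pvTouch u.length a e p] (u.getD p "") := by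
  induction k with
  | zero =>
    intro a e u hk hb
    have he : e ≤ a := by omega
    rw [PySem.List.pyRange_one_eq_nil he]
    refine ⟨rfl, ?_⟩
    intro p hp
    have ht : pvTouch u.length a e p = 0 := by unfold pvTouch; split_ifs <;> omega
    simp [ht]
  | succ k ih =>
    intro a e u hk hb
    have hae : a < e := by omega
    obtain ⟨h1, h2⟩ := hb hae
    rw [PySem.List.pyRange_one_cons hae]
    simp only [List.foldl_cons]
    have hlen := pvAStep_length u a
    obtain ⟨ihlen, ihpt⟩ := ih (a + 1) e (pvAStep u a) (by omega)
      (by intro _; constructor <;> rw [hlen] <;> omega)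
    rw [hlen] at ihlen
    refine ⟨ihlen, ?_⟩
    intro p hp
    rw [ihpt p (by omega)]
    rw [pvAStep_getD u a p h1 (by omega) hp]
    by_cases hhit : ((p : Int) = a ∨ (p : Int) - u.length = a)
    · rw [if_pos hhit]
      have ht : pvTouch (pvAStep u a).length (a + 1) e p + 1 = pvTouch u.length a e p := by
        rw [hlen]; unfold pvTouch; split_ifs <;> omega
      rw [← ht, Function.iterate_succ_apply]
    · rw [if_neg hhit]
      congr 1
      rw [hlen]; unfold pvTouch; split_ifs <;> omega

theorem pv_outerA (sim : List (Int × Int)) : ∀ (u : List String) (contig : Int),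
    Pre_get_underline u sim contig →
    (get_underline u sim contig).length = u.length ∧
    ∀ p < u.length, (get_underline u sim contig).getD p "" =
      pvStep^[pvCntB sim p + pvCntW u.length sim p] (u.getD p "") := by
  induction sim with
  | nil =>
    intro u contig _
    refine ⟨rfl, ?_⟩
    intro p hp
    simp [get_underline, pvCntB, pvCntW]
  | cons se rest ih =>
    intro u contig hPre
    simp only [get_underline, List.foldl_cons]
    obtain ⟨l1, p1⟩ := pv_innerA (se.2 - se.1).toNat se.1 se.2 u rfl
      (fun hlt => hPre se List.mem_cons_self hlt)
    have hPre' : Pre_get_underline ((PySem.List.pyRange se.1 se.2 1).foldl pvAStep u) rest contig := by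
      intro se' hmem hlt
      rw [l1]
      exact hPre se' (List.mem_cons_of_mem se hmem) hlt
    obtain ⟨l2, p2⟩ := ih ((PySem.List.pyRange se.1 se.2 1).foldl pvAStep u) contig hPre'
    rw [l1] at l2 p2
    refine ⟨l2, ?_⟩
    intro p hp
    show (get_underline ((PySem.List.pyRange se.1 se.2 1).foldl pvAStep u) rest contig).getD p "" = _
    rw [p2 p hp, p1 p hp, ← Function.iterate_add_apply]
    congr 1
    simp only [pvCntB, pvCntW, List.map_cons, List.sum_cons, pvTouch, pvCovers, pvWraps]
    ring

-- ---- B side ----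

def pvPre (d : List Int) (k : Nat) : Int := ∑ j ∈ Finset.range k, d.getD j 0

theorem pvDStep_len (n : Int) (d : List Int) (se : Int × Int) :
    (pvDStep n d se).length = d.length := by
  simp only [pvDStep]
  split_ifs <;> simp [PySem.List.length_pySetD]

theorem pvPre_set (d : List Int) (j : Nat) (v : Int) (k : Nat) (hj : j < d.length) :
    pvPre (d.set j v) k = pvPre d k + (if j < k then v - d.getD j 0 else 0) := by
  unfold pvPre
  have hterm : ∀ x ∈ Finset.range k,
      (d.set j v).getD x 0 = d.getD x 0 + (if j = x then v - d.getD j 0 else 0) := by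
    intro x _
    by_cases hxj : j = x
    · subst hxj
      simp [List.getD_eq_getElem?_getD, List.getElem?_set, hj]
    · simp [List.getD_eq_getElem?_getD, List.getElem?_set, hxj]
  rw [Finset.sum_congr rfl hterm, Finset.sum_add_distrib, Finset.sum_ite_eq]
  simp [Finset.mem_range]

-- per-interval contribution of the difference array to the prefix sum up to k
def pvContrib (n : Int) (se : Int × Int) (k : Nat) : Int :=
  if max se.1 0 < min se.2 n then
    (if (max se.1 0).toNat < k then 1 else 0) - (if (min se.2 n).toNat < k then 1 else 0)
  else 0

theorem pvDStep_pre (n : Int) (d : List Int) (se : Int × Int) (k : Nat)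
    (hlen : d.length = n.toNat + 1) (hn : 0 ≤ n) :
    pvPre (pvDStep n d se) k = pvPre d k + pvContrib n se k := by
  simp only [pvDStep]
  unfold pvContrib
  by_cases hg : max se.1 0 < min se.2 n
  · rw [if_pos hg, if_pos hg]
    have hs0 : (0:Int) ≤ max se.1 0 := le_max_right se.1 0
    have he0 : (0:Int) ≤ min se.2 n := by omega
    have hen : min se.2 n ≤ n := min_le_right se.2 n
    have hsl : (max se.1 0).toNat < d.length := by omega
    have hel : (min se.2 n).toNat < d.length := by omega
    have hd1 : PySem.List.pySetD d (max se.1 0) (PySem.List.pyGetD d (max se.1 0) 0 + 1)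
        = d.set (max se.1 0).toNat (d.getD (max se.1 0).toNat 0 + 1) := by
      rw [PySem.List.pySetD_of_nonneg d _ hs0,
        PySem.List.pyGetD_eq_getElem d 0 hs0 (by omega),
        List.getD_eq_getElem d 0 hsl]
    rw [hd1]
    set d1 := d.set (max se.1 0).toNat (d.getD (max se.1 0).toNat 0 + 1) with hd1def
    have hl1 : d1.length = d.length := by simp [hd1def]
    have hd2 : PySem.List.pySetD d1 (min se.2 n) (PySem.List.pyGetD d1 (min se.2 n) 0 - 1)
        = d1.set (min se.2 n).toNat (d1.getD (min se.2 n).toNat 0 - 1) := by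
      rw [PySem.List.pySetD_of_nonneg d1 _ he0,
        PySem.List.pyGetD_eq_getElem d1 0 he0 (by omega),
        List.getD_eq_getElem d1 0 (by omega)]
    rw [hd2]
    rw [pvPre_set d1 _ _ k (by omega), pvPre_set d _ _ k hsl]
    split_ifs <;> ring
  · rw [if_neg hg, if_neg hg, add_zero]

theorem pv_diff_pre (n : Int) (k : Nat) (sim : List (Int × Int)) (hn : 0 ≤ n) :
    ∀ d : List Int, d.length = n.toNat + 1 →
    pvPre (sim.foldl (pvDStep n) d) k = pvPre d k + (sim.map (fun se => pvContrib n se k)).sum := by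
  induction sim with
  | nil => intro d _; simp
  | cons se rest ih =>
    intro d hd
    simp only [List.foldl_cons, List.map_cons, List.sum_cons]
    rw [ih (pvDStep n d se) (by rw [pvDStep_len, hd]), pvDStep_pre n d se k hd hn]
    ring

theorem pv_diff_char (u : List String) (sim : List (Int × Int)) (p : Nat) (hp : p < u.length) :
    pvPre (pvDiffFinal (u.length : Int) sim) (p + 1) = (pvCntB sim p : Int) := by
  unfold pvDiffFinal
  rw [pv_diff_pre (u.length : Int) (p + 1) sim (by omega) _ (by simp)]
  have h0 : pvPre (List.replicate ((u.length : Int).toNat + 1) (0:Int)) (p + 1) = 0 := by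
    unfold pvPre
    have : ∀ x ∈ Finset.range (p + 1),
        (List.replicate ((u.length : Int).toNat + 1) (0:Int)).getD x 0 = 0 := by
      intro x _
      simp [List.getD_eq_getElem?_getD, List.getElem?_replicate]
      split_ifs <;> rfl
    rw [Finset.sum_congr rfl this, Finset.sum_const_zero]
  rw [h0, zero_add]
  clear h0
  induction sim with
  | nil => simp [pvCntB]
  | cons se rest ih =>
    simp only [List.map_cons, List.sum_cons, pvCntB]
    rw [show (rest.map (fun se => pvCovers se p)).sum = pvCntB rest p from rfl]
    push_cast
    rw [← ih]
    have : pvContrib (u.length : Int) se (p + 1) = (pvCovers se p : Int) := by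
      unfold pvContrib pvCovers
      split_ifs <;> push_cast <;> omega
    rw [this]

-- the value B writes at position p
def pvBVal (diff : List Int) (p : Nat) (ch : String) : String :=
  match pvRank ch with
  | none => ch
  | some r => PySem.List.pyGetD pvOrder (min (r + pvPre diff (p + 1)) 3) ch

theorem pv_alt_run (diff : List Int) (xs : List String) : ∀ (k : Nat) (acc : List String),
    ((PySem.List.enumerate xs (k : Int)).foldl (pvBStep diff) (pvPre diff k, acc)).2
      = acc ++ (List.range xs.length).map (fun j => pvBVal diff (k + j) (xs.getD j "")) := by
  induction xs with
  | nil => intro k acc; simp [PySem.List.enumerate_nil]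
  | cons x xs ih =>
    intro k acc
    rw [PySem.List.enumerate_cons]
    simp only [List.foldl_cons]
    have hstep : pvBStep diff (pvPre diff k, acc) ((k : Int), x)
        = (pvPre diff (k + 1), acc ++ [pvBVal diff k x]) := by
      simp only [pvBStep, pvBVal, PySem.List.pyGetD_natCast]
      have hc : pvPre diff k + diff.getD k 0 = pvPre diff (k + 1) := by
        unfold pvPre; rw [Finset.sum_range_succ]
      rw [List.getD_eq_getElem?_getD] at hc
      cases h : pvRank x with
      | none => simp [h, hc]
      | some r => simp [h, hc]
    rw [hstep]
    have hk1 : ((k : Int) + 1) = ((k + 1 : Nat) : Int) := by push_cast; ring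
    rw [hk1, ih (k + 1) (acc ++ [pvBVal diff k x])]
    rw [List.append_assoc]
    congr 1
    simp only [List.length_cons]
    rw [List.range_succ_eq_map, List.map_cons, List.map_map]
    simp only [List.singleton_append, Nat.add_zero, List.getD_cons_zero]
    congr 1
    refine List.map_congr_left ?_
    intro j _
    simp only [Function.comp_apply, Nat.succ_eq_add_one, List.getD_cons_succ]
    congr 1
    omega

theorem pv_alt_char (u : List String) (sim : List (Int × Int)) (contig : Int) :
    get_underline_alt u sim contig =
      (List.range u.length).map (fun p => pvBVal (pvDiffFinal (u.length : Int) sim) p (u.getD p "")) := by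
  simp only [get_underline_alt]
  have h0 : ((0 : Int), ([] : List String))
      = (pvPre (pvDiffFinal (u.length : Int) sim) 0, ([] : List String)) := by
    simp [pvPre]
  have he : PySem.List.enumerate u = PySem.List.enumerate u (((0 : Nat) : Int)) := by norm_num
  rw [h0, he, pv_alt_run]
  simp

-- ---- compare ----

theorem pv_iter_order (k r : Nat) (hr : r ≤ 3) :
    pvStep^[k] (pvOrder.getD r "") = pvOrder.getD (min (r + k) 3) "" := by
  induction k generalizing r with
  | zero =>
    rw [Function.iterate_zero_apply]
    congr 1
    omega
  | succ k ih =>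
    rw [Function.iterate_succ_apply]
    have hstep : pvStep (pvOrder.getD r "") = pvOrder.getD (min (r + 1) 3) "" := by
      interval_cases r <;> decide
    rw [hstep, ih (min (r + 1) 3) (by omega)]
    congr 1
    omega

theorem pvB_get (rn cB : Nat) (ch : String) :
    PySem.List.pyGetD pvOrder (min ((rn : Int) + (cB : Int)) 3) ch
      = pvOrder.getD (min (rn + cB) 3) "" := by
  have hcast : min ((rn : Int) + (cB : Int)) 3 = ((min (rn + cB) 3 : Nat) : Int) := by
    push_cast; omega
  rw [hcast, PySem.List.pyGetD_natCast]
  have hlt : min (rn + cB) 3 < pvOrder.length := by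
    simp only [pvOrder, List.length_cons, List.length_nil]; omega
  rw [List.getD_eq_getElem pvOrder ch hlt, List.getD_eq_getElem pvOrder "" hlt]

theorem pvBVal_chain (u : List String) (sim : List (Int × Int)) (p : Nat) (hp : p < u.length)
    (rn : Nat) (hr : pvRank (u.getD p "") = some ((rn : Nat) : Int)) :
    pvBVal (pvDiffFinal (u.length : Int) sim) p (u.getD p "")
      = pvOrder.getD (min (rn + pvCntB sim p) 3) "" := by
  simp only [pvBVal, hr]
  rw [pv_diff_char u sim p hp, pvB_get rn (pvCntB sim p) (u.getD p "")]

theorem pv_order_ne (m1 m2 : Nat) (h1 : m1 ≤ 3) (h2 : m2 ≤ 3) (h : m1 ≠ m2) :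
    pvOrder.getD m1 "" ≠ pvOrder.getD m2 "" := by
  interval_cases m1 <;> interval_cases m2 <;> first | omega | decide

theorem pv_point_eq (u : List String) (sim : List (Int × Int)) (contig : Int)
    (hD : ¬ D_get_underline u sim contig) (p : Nat) (hp : p < u.length) :
    pvStep^[pvCntB sim p + pvCntW u.length sim p] (u.getD p "")
      = pvBVal (pvDiffFinal (u.length : Int) sim) p (u.getD p "") := by
  have hnd : ∀ (h1 : 1 ≤ pvCntW u.length sim p),
      ¬((u.getD p "" = " " ∧ pvCntB sim p < 3) ∨ (u.getD p "" = "_" ∧ pvCntB sim p < 2) ∨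
        (u.getD p "" = "=" ∧ pvCntB sim p < 1)) :=
    fun h1 h2 => hD ⟨p, List.mem_range.mpr hp, h1, h2⟩
  rcases h0 : pvRank (u.getD p "") with _ | r
  · -- not a chain char: pvStep fixes it and B copies it
    have hne : u.getD p "" ≠ "_" ∧ u.getD p "" ≠ " " ∧ u.getD p "" ≠ "=" := by
      unfold pvRank at h0; split_ifs at h0 <;> simp_all
    have hfix : pvStep (u.getD p "") = u.getD p "" := by
      unfold pvStep; rw [if_neg hne.1, if_neg hne.2.1, if_neg hne.2.2]
    rw [Function.iterate_fixed hfix]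
    simp only [pvBVal, h0]
  · -- chain char: both sides are pvOrder indexed by a capped count
    obtain ⟨rn, hrq, hrn3, hch, hslack⟩ :
        ∃ rn : Nat, r = (rn : Int) ∧ rn ≤ 3 ∧ u.getD p "" = pvOrder.getD rn "" ∧
          (pvCntW u.length sim p = 0 ∨ 3 ≤ rn + pvCntB sim p) := by
      unfold pvRank at h0
      split_ifs at h0 with hc1 hc2 hc3 hc4
      · refine ⟨0, by injection h0 with h; omega, by norm_num, by rw [hc1]; rfl, ?_⟩
        rcases Nat.eq_zero_or_pos (pvCntW u.length sim p) with h | h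
        · exact Or.inl h
        · right; by_contra hlt; exact hnd h (Or.inl ⟨hc1, by omega⟩)
      · refine ⟨1, by injection h0 with h; omega, by norm_num, by rw [hc2]; rfl, ?_⟩
        rcases Nat.eq_zero_or_pos (pvCntW u.length sim p) with h | h
        · exact Or.inl h
        · right; by_contra hlt; exact hnd h (Or.inr (Or.inl ⟨hc2, by omega⟩))
      · refine ⟨2, by injection h0 with h; omega, by norm_num, by rw [hc3]; rfl, ?_⟩
        rcases Nat.eq_zero_or_pos (pvCntW u.length sim p) with h | h
        · exact Or.inl h
        · right; by_contra hlt; exact hnd h (Or.inr (Or.inr ⟨hc3, by omega⟩))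
      · exact ⟨3, by injection h0 with h; omega, by norm_num, by rw [hc4]; rfl, Or.inr (by omega)⟩
    rw [pvBVal_chain u sim p hp rn (by rw [h0, hrq])]
    rw [hch, pv_iter_order (pvCntB sim p + pvCntW u.length sim p) rn hrn3]
    have hmin : min (rn + (pvCntB sim p + pvCntW u.length sim p)) 3
        = min (rn + pvCntB sim p) 3 := by omega
    rw [hmin]

-- ===== VERDICT (by name: the statement is the Claim_ definition above) =====
theorem get_underline_spec : Claim_unchanged_get_underline := by
  intro u sim contig _hDom hPre hD
  obtain ⟨hlen, hpt⟩ := pv_outerA sim u contig hPre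
  show get_underline u sim contig = _
  rw [pv_alt_char u sim contig]
  apply List.ext_getElem
  · simp [hlen]
  · intro p h1 h2
    have hp : p < u.length := by simpa [hlen] using h1
    have := hpt p hp
    rw [List.getD_eq_getElem?_getD, List.getElem?_eq_getElem h1] at this
    simp only [Option.getD_some] at this
    rw [this]
    rw [List.getElem_map, List.getElem_range]
    exact pv_point_eq u sim contig hD p hp

theorem get_underline_changed : Claim_changed_get_underline := by
  unfold Claim_changed_get_underline; decide

theorem get_underline_tight : Claim_exact_get_underline := by
  intro u sim contig _hDom hPre hD heq
  obtain ⟨p, hpR, hw, hcase⟩ := hD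
  have hp : p < u.length := List.mem_range.mp hpR
  obtain ⟨hlen, hpt⟩ := pv_outerA sim u contig hPre
  have hApB : (get_underline u sim contig).getD p ""
      = (get_underline_alt u sim contig).getD p "" := by rw [heq]
  rw [hpt p hp, pv_alt_char u sim contig,
    PySem.List.getD_map_range _ u.length p "" hp] at hApB
  rcases hcase with ⟨hch, hcb⟩ | ⟨hch, hcb⟩ | ⟨hch, hcb⟩
  · rw [pvBVal_chain u sim p hp 0 (by rw [hch]; decide)] at hApB
    rw [hch, show (" " : String) = pvOrder.getD 0 "" from rfl,
      pv_iter_order (pvCntB sim p + pvCntW u.length sim p) 0 (by norm_num)] at hApB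
    exact pv_order_ne _ _ (by omega) (by omega) (by omega) hApB
  · rw [pvBVal_chain u sim p hp 1 (by rw [hch]; decide)] at hApB
    rw [hch, show ("_" : String) = pvOrder.getD 1 "" from rfl,
      pv_iter_order (pvCntB sim p + pvCntW u.length sim p) 1 (by norm_num)] at hApB
    exact pv_order_ne _ _ (by omega) (by omega) (by omega) hApB
  · rw [pvBVal_chain u sim p hp 2 (by rw [hch]; decide)] at hApB
    rw [hch, show ("=" : String) = pvOrder.getD 2 "" from rfl,
      pv_iter_order (pvCntB sim p + pvCntW u.length sim p) 2 (by norm_num)] at hApB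
    exact pv_order_ne _ _ (by omega) (by omega) (by omega) hApB
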